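-- pv_equiv track=rewrite | github.com/Arsen1302/Code-copy-detector | TestData/solutions/problem_1472_4.py | solution_1472_4
-- ===== SOURCE A (Python) =====
-- from typing import List
--
-- def solution_1472_4(cost: List[int]) -> int:
--     cost.sort(reverse=True)
--     bought = res = 0
--     for p in cost:
--         if bought < 2:
--             res += p
--             bought += 1
--         else:
--             bought = 0
--     return res
-- ===== SOURCE B (Python) =====
-- from typing import List
--
-- def solution_1472_4(cost: List[int]) -> int:
--     cost.sort(reverse=True)
--
--     def pay(lst: List[int]) -> int:
--         if not lst:
--             return 0
--         return sum(lst[:2]) + pay(lst[3:])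
--
--     return pay(cost)
-- ===== Notes on version B (the rewrite author's own statement) =====
-- stated objective: alternative
-- what changed: Replaces the iterative bought-counter state machine with a recursive decomposition that consumes the descending-sorted list in chunks of three, paying for the first two of each chunk and recursing on the rest.
import Mathlib
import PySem

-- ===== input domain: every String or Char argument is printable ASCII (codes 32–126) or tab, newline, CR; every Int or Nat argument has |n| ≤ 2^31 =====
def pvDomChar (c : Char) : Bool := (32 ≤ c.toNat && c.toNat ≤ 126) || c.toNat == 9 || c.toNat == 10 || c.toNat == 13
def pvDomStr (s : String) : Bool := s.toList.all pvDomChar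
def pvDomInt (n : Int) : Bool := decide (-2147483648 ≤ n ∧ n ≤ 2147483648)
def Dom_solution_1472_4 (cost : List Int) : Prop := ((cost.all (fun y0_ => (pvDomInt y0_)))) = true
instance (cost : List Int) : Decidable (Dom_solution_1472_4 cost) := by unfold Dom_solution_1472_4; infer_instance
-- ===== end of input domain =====

-- B replaces A's iterative bought-counter state machine with a recursion that consumes the
-- descending-sorted list in chunks of three, paying for the first two of each chunk.
-- Both sort the argument in place in Python; the equivalence proved is about the return value.


-- ===== PORT A =====
def solution_1472_4 (cost : List Int) : Int :=
  let s := PySem.List.sorted cost (fun x => x) true   -- cost.sort(reverse=True)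
  -- bought = res = 0; for p in s: if bought < 2: res += p; bought += 1 else: bought = 0
  (s.foldl (fun (st : Int × Int) p =>
      if st.1 < 2 then (st.1 + 1, st.2 + p) else ((0 : Int), st.2))
    ((0 : Int), (0 : Int))).2

-- ===== PORT B =====
-- pay(lst): if not lst: return 0; return sum(lst[:2]) + pay(lst[3:])
-- (the three nonempty cases spell out lst[:2] and lst[3:] for lists of length 1, 2, and ≥ 3)
def pay3 : List Int → Int
  | [] => 0
  | [a] => a
  | [a, b] => a + b
  | a :: b :: _ :: t => a + b + pay3 t

def solution_1472_4_alt (cost : List Int) : Int :=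
  let s := PySem.List.sorted cost (fun x => x) true   -- cost.sort(reverse=True)
  pay3 s

-- ===== PRECONDITION & SPEC =====
def Spec_solution_1472_4 (cost : List Int) (out : Int) : Prop := out = solution_1472_4_alt cost
instance (cost : List Int) (out : Int) : Decidable (Spec_solution_1472_4 cost out) := by unfold Spec_solution_1472_4; infer_instance

-- ===== CLAIM (what is proved, stated in full; the proofs are below) =====
def Claim_equal_solution_1472_4 : Prop := ∀ (cost : List Int), Dom_solution_1472_4 cost → Spec_solution_1472_4 cost (solution_1472_4 cost)

-- ===== LEMMAS AND PROOFS =====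

theorem loopA_eq (l : List Int) (r : Int) :
    (l.foldl (fun (st : Int × Int) p =>
        if st.1 < 2 then (st.1 + 1, st.2 + p) else ((0 : Int), st.2)) ((0 : Int), r)).2
      = r + pay3 l := by
  induction l using pay3.induct generalizing r with
  | case1 => simp [pay3]
  | case2 a => simp [pay3]
  | case3 a b => simp [pay3]; ring
  | case4 a b c t ih =>
    simp only [List.foldl_cons]
    rw [if_pos (show (0:Int) < 2 by decide)]
    rw [if_pos (show (0:Int)+1 < 2 by decide)]
    rw [if_neg (show ¬((0:Int)+1+1 < 2) by decide)]
    rw [ih]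
    simp [pay3]; ring

-- ===== VERDICT (by name: the statement is the Claim_ definition above) =====
theorem solution_1472_4_spec : Claim_equal_solution_1472_4 := by
  intro cost _
  unfold Spec_solution_1472_4 solution_1472_4 solution_1472_4_alt
  simp only
  rw [loopA_eq]
  ring
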